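-- pv_equiv track=rewrite | github.com/jtstempel/206-Project-1 | 206project1.py | classSizes
-- ===== SOURCE A (Python) =====
-- def classSizes(data):
-- # Input: list of dictionaries
-- # Output: Return a list of tuples ordered by
-- # ClassName and Class size, e.g
-- # [('Senior', 26), ('Junior', 25), ('Freshman', 21), ('Sophomore', 18)]
--
-- 	#Your code here:
-- 	list_numbers = []
-- 	number_senior = 0
-- 	number_junior = 0
-- 	number_freshman = 0
-- 	number_sophomore = 0
-- 	for an_item in data:
-- 		if an_item['Class'] == 'Senior':
-- 			number_senior += 1
-- 		elif an_item['Class'] == 'Junior':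
-- 			number_junior += 1
-- 		elif an_item['Class'] == 'Freshman':
-- 			number_freshman += 1
-- 		elif an_item['Class'] == 'Sophomore':
-- 			number_sophomore +=1
--
-- 	list_numbers.append(('Senior', number_senior))
-- 	list_numbers.append(('Junior', number_junior))
-- 	list_numbers.append(('Freshman', number_freshman))
-- 	list_numbers.append(('Sophomore', number_sophomore))
--
-- 	return sorted(list_numbers, reverse = True, key = lambda x: x[1])
-- ===== SOURCE B (Python) =====
-- def classSizes(data):
--     number_senior = sum(1 for d in data if d['Class'] == 'Senior')
--     number_junior = sum(1 for d in data if d['Class'] == 'Junior')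
--     number_freshman = sum(1 for d in data if d['Class'] == 'Freshman')
--     number_sophomore = sum(1 for d in data if d['Class'] == 'Sophomore')
--     return sorted([('Senior', number_senior), ('Junior', number_junior),
--                    ('Freshman', number_freshman), ('Sophomore', number_sophomore)],
--                   reverse=True, key=lambda x: x[1])
-- ===== Notes on version B (the rewrite author's own statement) =====
-- stated objective: idiomatic
-- what changed: Replaces the single accumulating loop with four independent sum-comprehension scans, one per class, then sorts the fixed-order tuple list the same way.
import Mathlib
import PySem

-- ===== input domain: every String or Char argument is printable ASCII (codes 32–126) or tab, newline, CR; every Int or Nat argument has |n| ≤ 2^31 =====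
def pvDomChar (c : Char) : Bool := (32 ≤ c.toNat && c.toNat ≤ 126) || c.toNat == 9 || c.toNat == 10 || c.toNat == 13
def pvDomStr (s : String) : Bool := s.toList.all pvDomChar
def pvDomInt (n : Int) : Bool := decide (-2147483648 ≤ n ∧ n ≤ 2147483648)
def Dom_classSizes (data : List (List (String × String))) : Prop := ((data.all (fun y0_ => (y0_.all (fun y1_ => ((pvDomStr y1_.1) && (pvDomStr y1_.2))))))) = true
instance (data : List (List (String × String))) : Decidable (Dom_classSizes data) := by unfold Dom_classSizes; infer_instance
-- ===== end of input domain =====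

-- B replaces A's single accumulating loop by four independent per-class scans (idiomatic).

-- ===== PORT A =====
-- A's single loop over the 4-counter state (senior, junior, freshman, sophomore).
def classSizesStep (st : Int × Int × Int × Int) (an_item : List (String × String)) :
    Int × Int × Int × Int :=
  let c := (PySem.Dict.mk an_item).getD "Class" ""
  if c = "Senior" then (st.1 + 1, st.2.1, st.2.2.1, st.2.2.2)
  else if c = "Junior" then (st.1, st.2.1 + 1, st.2.2.1, st.2.2.2)
  else if c = "Freshman" then (st.1, st.2.1, st.2.2.1 + 1, st.2.2.2)
  else if c = "Sophomore" then (st.1, st.2.1, st.2.2.1, st.2.2.2 + 1)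
  else st

def classSizes (data : List (List (String × String))) : List (String × Int) :=
  let st := data.foldl classSizesStep (0, 0, 0, 0)
  PySem.List.sorted
    [("Senior", st.1), ("Junior", st.2.1), ("Freshman", st.2.2.1), ("Sophomore", st.2.2.2)]
    (fun x => x.2) true

-- ===== PORT B =====
-- B: one separate scan per class (sum(1 for d in data if d['Class'] == c)).
def countClass (data : List (List (String × String))) (c : String) : Int :=
  (data.countP (fun d => (PySem.Dict.mk d).getD "Class" "" == c) : Nat)

def classSizes_alt (data : List (List (String × String))) : List (String × Int) :=
  let number_senior := countClass data "Senior"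
  let number_junior := countClass data "Junior"
  let number_freshman := countClass data "Freshman"
  let number_sophomore := countClass data "Sophomore"
  PySem.List.sorted
    [("Senior", number_senior), ("Junior", number_junior),
     ("Freshman", number_freshman), ("Sophomore", number_sophomore)]
    (fun x => x.2) true

-- ===== PRECONDITION & SPEC =====
-- Pre_ excludes exactly the inputs where some item lacks the key 'Class' (both Pythons raise KeyError).
def Pre_classSizes (data : List (List (String × String))) : Prop :=
  (data.all (fun d => (PySem.Dict.mk d).contains "Class")) = true
instance (data : List (List (String × String))) : Decidable (Pre_classSizes data) := by
  unfold Pre_classSizes; infer_instance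

def pvWitness_classSizes : (List (List (String × String))) :=
  [[("Class", "Senior")], [("Class", "Junior")], [("Class", "Senior")]]

def Spec_classSizes (data : List (List (String × String))) (out : List (String × Int)) : Prop := out = classSizes_alt data
instance (data : List (List (String × String))) (out : List (String × Int)) : Decidable (Spec_classSizes data out) := by unfold Spec_classSizes; infer_instance

-- ===== CLAIM (what is proved, stated in full; the proofs are below) =====
def Claim_equal_classSizes : Prop := ∀ (data : List (List (String × String))), Dom_classSizes data → Pre_classSizes data → Spec_classSizes data (classSizes data)

-- ===== LEMMAS AND PROOFS =====
lemma fold_counts (data : List (List (String × String))) (s j f so : Int) :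
    data.foldl classSizesStep (s, j, f, so) =
      (s + countClass data "Senior", j + countClass data "Junior",
       f + countClass data "Freshman", so + countClass data "Sophomore") := by
  induction data generalizing s j f so with
  | nil => simp [countClass]
  | cons d t ih =>
    simp only [List.foldl_cons, ih]
    unfold classSizesStep countClass
    simp only [List.countP_cons]
    split_ifs with h1 h2 h3 h4 <;>
      simp_all <;> ring

-- ===== VERDICT (by name: the statement is the Claim_ definition above) =====
theorem classSizes_spec : Claim_equal_classSizes := by
  intro data _ _
  unfold Spec_classSizes classSizes classSizes_alt
  rw [fold_counts]
  simp
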